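-- pv_equiv track=rewrite | github.com/NaturaChile/natura-it-monorepo | rpa_headless_linux/gsp_v5/shared/email/templates.py | _build_product_detail_section
-- ===== SOURCE A (Python) =====
-- from typing import Dict, List, Optional
--
-- def _build_product_rows(products: List[Dict[str, str]], status_filter: str) -> str:
--     """Build <tr> rows for a product table filtered by status."""
--     rows = ""
--     for p in products:
--         if p.get("status") != status_filter:
--             continue
--         code = p.get("product_code", "—")
--         name = p.get("product_name") or "—"
--         if status_filter == "ok":
--             icon = "&#10003;"
--             color = "#2e7d32"
--         else:
--             icon = "&#10007;"
--             color = "#c62828"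
--         rows += (
--             f'<tr>'
--             f'<td style="border:1px solid #ddd;padding:8px;">{code}</td>'
--             f'<td style="border:1px solid #ddd;padding:8px;">{name}</td>'
--             f'<td style="border:1px solid #ddd;padding:8px;text-align:center;color:{color};font-weight:bold;">{icon}</td>'
--         )
--         if status_filter != "ok":
--             reason = p.get("error_message", "")
--             rows += f'<td style="border:1px solid #ddd;padding:8px;font-size:12px;color:#777;">{reason}</td>'
--         rows += '</tr>\n'
--     return rows
--
-- def _build_product_detail_section(products: List[Dict[str, str]]) -> str:
--     """Build HTML section with product tables for partial orders.
--
--     Inserted between Row 4 (VARIABLE) and Row 5 (bottom image) in the template.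
--     """
--     ok_rows = _build_product_rows(products, "ok")
--     fail_rows = _build_product_rows(products, "failed")
--     ok_count = sum(1 for p in products if p.get("status") == "ok")
--     fail_count = sum(1 for p in products if p.get("status") == "failed")
--
--     html = (
--         '<table align="center" width="100%" border="0" cellpadding="0" cellspacing="0" '
--         'role="presentation" style="mso-table-lspace:0pt;mso-table-rspace:0pt;">\n'
--         '<tbody><tr><td>\n'
--         '<table align="center" border="0" cellpadding="0" cellspacing="0" '
--         'role="presentation" style="mso-table-lspace:0pt;mso-table-rspace:0pt;'
--         'background-color:#ffffff;border-radius:0;color:#000000;width:600px;margin:0 auto;" width="600">\n'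
--         '<tbody><tr>\n'
--         '<td style="padding:20px 30px;font-family:\'Helvetica Neue\',Helvetica,Arial,sans-serif;">\n'
--         '<p style="font-size:14px;color:#333;margin:0 0 15px 0;">'
--         'Revisa el detalle a continuaci&oacute;n. Si necesitas ayuda, comun&iacute;cate con tu L&iacute;der.</p>\n'
--     )
--
--     if ok_count > 0:
--         html += (
--             f'<p style="font-size:13px;font-weight:bold;color:#2e7d32;margin:0 0 5px 0;">'
--             f'Productos cargados ({ok_count})</p>\n'
--             '<table width="100%" border="0" cellspacing="0" cellpadding="8" '
--             'style="border-collapse:collapse;font-size:13px;margin-bottom:15px;">\n'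
--             '<thead><tr style="background-color:#4caf50;color:#fff;">'
--             '<th style="border:1px solid #ddd;">C&oacute;digo</th>'
--             '<th style="border:1px solid #ddd;">Producto</th>'
--             '<th style="border:1px solid #ddd;text-align:center;">Estado</th>'
--             '</tr></thead>\n'
--             f'<tbody>{ok_rows}</tbody>\n'
--             '</table>\n'
--         )
--
--     if fail_count > 0:
--         html += (
--             f'<p style="font-size:13px;font-weight:bold;color:#c62828;margin:0 0 5px 0;">'
--             f'Productos no disponibles ({fail_count})</p>\n'
--             '<table width="100%" border="0" cellspacing="0" cellpadding="8" '
--             'style="border-collapse:collapse;font-size:13px;margin-bottom:15px;">\n'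
--             '<thead><tr style="background-color:#e53935;color:#fff;">'
--             '<th style="border:1px solid #ddd;">C&oacute;digo</th>'
--             '<th style="border:1px solid #ddd;">Producto</th>'
--             '<th style="border:1px solid #ddd;text-align:center;">Estado</th>'
--             '<th style="border:1px solid #ddd;">Motivo</th>'
--             '</tr></thead>\n'
--             f'<tbody>{fail_rows}</tbody>\n'
--             '</table>\n'
--         )
--
--     html += (
--         '</td>\n</tr></tbody>\n</table>\n'
--         '</td></tr></tbody>\n</table>'
--     )
--     return html
-- ===== SOURCE B (Python) =====
-- def _build_product_detail_section(products):
--     """Build HTML section with product tables for partial orders (single-pass partition)."""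
--     ok_list = []
--     fail_list = []
--     for p in products:
--         status = p.get("status")
--         if status not in ("ok", "failed"):
--             continue
--         code = p.get("product_code", "—")
--         name = p.get("product_name") or "—"
--         if status == "ok":
--             ok_list.append(
--                 '<tr>'
--                 f'<td style="border:1px solid #ddd;padding:8px;">{code}</td>'
--                 f'<td style="border:1px solid #ddd;padding:8px;">{name}</td>'
--                 '<td style="border:1px solid #ddd;padding:8px;text-align:center;color:#2e7d32;font-weight:bold;">&#10003;</td>'
--                 '</tr>\n'
--             )
--         else:
--             reason = p.get("error_message", "")
--             fail_list.append(
--                 '<tr>'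
--                 f'<td style="border:1px solid #ddd;padding:8px;">{code}</td>'
--                 f'<td style="border:1px solid #ddd;padding:8px;">{name}</td>'
--                 '<td style="border:1px solid #ddd;padding:8px;text-align:center;color:#c62828;font-weight:bold;">&#10007;</td>'
--                 f'<td style="border:1px solid #ddd;padding:8px;font-size:12px;color:#777;">{reason}</td>'
--                 '</tr>\n'
--             )
--     ok_count = len(ok_list)
--     fail_count = len(fail_list)
--     ok_rows = "".join(ok_list)
--     fail_rows = "".join(fail_list)
--
--     html = (
--         '<table align="center" width="100%" border="0" cellpadding="0" cellspacing="0" '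
--         'role="presentation" style="mso-table-lspace:0pt;mso-table-rspace:0pt;">\n'
--         '<tbody><tr><td>\n'
--         '<table align="center" border="0" cellpadding="0" cellspacing="0" '
--         'role="presentation" style="mso-table-lspace:0pt;mso-table-rspace:0pt;'
--         'background-color:#ffffff;border-radius:0;color:#000000;width:600px;margin:0 auto;" width="600">\n'
--         '<tbody><tr>\n'
--         '<td style="padding:20px 30px;font-family:\'Helvetica Neue\',Helvetica,Arial,sans-serif;">\n'
--         '<p style="font-size:14px;color:#333;margin:0 0 15px 0;">'
--         'Revisa el detalle a continuaci&oacute;n. Si necesitas ayuda, comun&iacute;cate con tu L&iacute;der.</p>\n'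
--     )
--
--     if ok_count > 0:
--         html += (
--             f'<p style="font-size:13px;font-weight:bold;color:#2e7d32;margin:0 0 5px 0;">'
--             f'Productos cargados ({ok_count})</p>\n'
--             '<table width="100%" border="0" cellspacing="0" cellpadding="8" '
--             'style="border-collapse:collapse;font-size:13px;margin-bottom:15px;">\n'
--             '<thead><tr style="background-color:#4caf50;color:#fff;">'
--             '<th style="border:1px solid #ddd;">C&oacute;digo</th>'
--             '<th style="border:1px solid #ddd;">Producto</th>'
--             '<th style="border:1px solid #ddd;text-align:center;">Estado</th>'
--             '</tr></thead>\n'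
--             f'<tbody>{ok_rows}</tbody>\n'
--             '</table>\n'
--         )
--
--     if fail_count > 0:
--         html += (
--             f'<p style="font-size:13px;font-weight:bold;color:#c62828;margin:0 0 5px 0;">'
--             f'Productos no disponibles ({fail_count})</p>\n'
--             '<table width="100%" border="0" cellspacing="0" cellpadding="8" '
--             'style="border-collapse:collapse;font-size:13px;margin-bottom:15px;">\n'
--             '<thead><tr style="background-color:#e53935;color:#fff;">'
--             '<th style="border:1px solid #ddd;">C&oacute;digo</th>'
--             '<th style="border:1px solid #ddd;">Producto</th>'
--             '<th style="border:1px solid #ddd;text-align:center;">Estado</th>'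
--             '<th style="border:1px solid #ddd;">Motivo</th>'
--             '</tr></thead>\n'
--             f'<tbody>{fail_rows}</tbody>\n'
--             '</table>\n'
--         )
--
--     html += (
--         '</td>\n</tr></tbody>\n</table>\n'
--         '</td></tr></tbody>\n</table>'
--     )
--     return html
-- ===== Notes on version B (the rewrite author's own statement) =====
-- stated objective: alternative
-- what changed: Replaces A's four passes over the product list (two row-building scans plus two count scans) with a single loop that partitions products into ok/fail row lists, taking counts as list lengths and joining the lists.
import Mathlib
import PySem

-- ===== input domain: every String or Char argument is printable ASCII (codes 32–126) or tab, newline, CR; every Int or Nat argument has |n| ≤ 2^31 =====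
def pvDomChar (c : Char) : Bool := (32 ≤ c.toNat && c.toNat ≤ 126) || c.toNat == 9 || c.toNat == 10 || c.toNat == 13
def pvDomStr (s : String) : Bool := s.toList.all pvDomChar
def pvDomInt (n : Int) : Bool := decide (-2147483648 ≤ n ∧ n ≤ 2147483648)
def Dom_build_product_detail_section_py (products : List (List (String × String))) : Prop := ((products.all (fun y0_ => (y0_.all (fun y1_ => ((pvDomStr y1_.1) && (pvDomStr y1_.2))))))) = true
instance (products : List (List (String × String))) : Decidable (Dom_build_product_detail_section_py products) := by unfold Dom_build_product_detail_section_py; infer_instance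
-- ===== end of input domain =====

-- B replaces A's four scans over the product list with one partitioning loop; objective: alternative
-- (same output, single pass). The long HTML literals are identical in both Python sources, so both
-- ports share the named string constants below (naming a literal, not an algorithm).

-- dict lookup on the association list (first match = Python dict lookup under the type convention)
def pvGet (p : List (String × String)) (k : String) : Option String :=
  (p.find? (fun kv => kv.1 == k)).map (·.2)

-- shared HTML literals (identical text in both Python sources)
def pvTd : String := "<td style=\"border:1px solid #ddd;padding:8px;\">"
def pvTdIcon (color : String) : String :=
  "<td style=\"border:1px solid #ddd;padding:8px;text-align:center;color:" ++ color ++ ";font-weight:bold;\">"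
def pvTdReason : String := "<td style=\"border:1px solid #ddd;padding:8px;font-size:12px;color:#777;\">"
def pvHeader : String :=
  "<table align=\"center\" width=\"100%\" border=\"0\" cellpadding=\"0\" cellspacing=\"0\" role=\"presentation\" style=\"mso-table-lspace:0pt;mso-table-rspace:0pt;\">\n<tbody><tr><td>\n<table align=\"center\" border=\"0\" cellpadding=\"0\" cellspacing=\"0\" role=\"presentation\" style=\"mso-table-lspace:0pt;mso-table-rspace:0pt;background-color:#ffffff;border-radius:0;color:#000000;width:600px;margin:0 auto;\" width=\"600\">\n<tbody><tr>\n<td style=\"padding:20px 30px;font-family:'Helvetica Neue',Helvetica,Arial,sans-serif;\">\n<p style=\"font-size:14px;color:#333;margin:0 0 15px 0;\">Revisa el detalle a continuaci&oacute;n. Si necesitas ayuda, comun&iacute;cate con tu L&iacute;der.</p>\n"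
def pvOkBlock (c : Int) (rows : String) : String :=
  "<p style=\"font-size:13px;font-weight:bold;color:#2e7d32;margin:0 0 5px 0;\">Productos cargados (" ++ PySem.Int.toStr c ++ ")</p>\n<table width=\"100%\" border=\"0\" cellspacing=\"0\" cellpadding=\"8\" style=\"border-collapse:collapse;font-size:13px;margin-bottom:15px;\">\n<thead><tr style=\"background-color:#4caf50;color:#fff;\"><th style=\"border:1px solid #ddd;\">C&oacute;digo</th><th style=\"border:1px solid #ddd;\">Producto</th><th style=\"border:1px solid #ddd;text-align:center;\">Estado</th></tr></thead>\n<tbody>" ++ rows ++ "</tbody>\n</table>\n"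
def pvFailBlock (c : Int) (rows : String) : String :=
  "<p style=\"font-size:13px;font-weight:bold;color:#c62828;margin:0 0 5px 0;\">Productos no disponibles (" ++ PySem.Int.toStr c ++ ")</p>\n<table width=\"100%\" border=\"0\" cellspacing=\"0\" cellpadding=\"8\" style=\"border-collapse:collapse;font-size:13px;margin-bottom:15px;\">\n<thead><tr style=\"background-color:#e53935;color:#fff;\"><th style=\"border:1px solid #ddd;\">C&oacute;digo</th><th style=\"border:1px solid #ddd;\">Producto</th><th style=\"border:1px solid #ddd;text-align:center;\">Estado</th><th style=\"border:1px solid #ddd;\">Motivo</th></tr></thead>\n<tbody>" ++ rows ++ "</tbody>\n</table>\n"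
def pvFooter : String := "</td>\n</tr></tbody>\n</table>\n</td></tr></tbody>\n</table>"

-- ===== PORT A =====
-- _build_product_rows: one running string, append per matching product
def pvRowsA (products : List (List (String × String))) (status_filter : String) : String :=
  products.foldl (fun rows p =>
    if pvGet p "status" ≠ some status_filter then rows
    else
      let code := (pvGet p "product_code").getD "—"
      let name := match pvGet p "product_name" with      -- `p.get(...) or "—"`: None or "" falls back
        | some s => if s = "" then "—" else s
        | none => "—"
      let icon := if status_filter = "ok" then "&#10003;" else "&#10007;"
      let color := if status_filter = "ok" then "#2e7d32" else "#c62828"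
      let rows := rows ++ ("<tr>" ++ pvTd ++ code ++ "</td>" ++ pvTd ++ name ++ "</td>" ++ pvTdIcon color ++ icon ++ "</td>")
      let rows := if status_filter ≠ "ok" then
          rows ++ (pvTdReason ++ (pvGet p "error_message").getD "" ++ "</td>")
        else rows
      rows ++ "</tr>\n") ""

def pvCountA (products : List (List (String × String))) (s : String) : Int :=
  products.foldl (fun n p => if pvGet p "status" = some s then n + 1 else n) 0

def build_product_detail_section_py (products : List (List (String × String))) : String :=
  let ok_rows := pvRowsA products "ok"
  let fail_rows := pvRowsA products "failed"
  let ok_count := pvCountA products "ok"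
  let fail_count := pvCountA products "failed"
  let html := pvHeader
  let html := if ok_count > 0 then html ++ pvOkBlock ok_count ok_rows else html
  let html := if fail_count > 0 then html ++ pvFailBlock fail_count fail_rows else html
  html ++ pvFooter

-- ===== PORT B =====
def pvRowOkB (p : List (String × String)) : String :=
  let code := (pvGet p "product_code").getD "—"
  let name := match pvGet p "product_name" with
    | some s => if s = "" then "—" else s
    | none => "—"
  "<tr>" ++ pvTd ++ code ++ "</td>" ++ pvTd ++ name ++ "</td>" ++ pvTdIcon "#2e7d32" ++ "&#10003;" ++ "</td>" ++ "</tr>\n"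

def pvRowFailB (p : List (String × String)) : String :=
  let code := (pvGet p "product_code").getD "—"
  let name := match pvGet p "product_name" with
    | some s => if s = "" then "—" else s
    | none => "—"
  let reason := (pvGet p "error_message").getD ""
  "<tr>" ++ pvTd ++ code ++ "</td>" ++ pvTd ++ name ++ "</td>" ++ pvTdIcon "#c62828" ++ "&#10007;" ++ "</td>" ++ pvTdReason ++ reason ++ "</td>" ++ "</tr>\n"

-- single loop: partition into the two row lists
def pvPartB (products : List (List (String × String))) : List String × List String :=
  products.foldl (fun acc p =>
    if pvGet p "status" = some "ok" then (acc.1 ++ [pvRowOkB p], acc.2)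
    else if pvGet p "status" = some "failed" then (acc.1, acc.2 ++ [pvRowFailB p])
    else acc) ([], [])

def build_product_detail_section_py_alt (products : List (List (String × String))) : String :=
  let acc := pvPartB products
  let ok_count : Int := acc.1.length
  let fail_count : Int := acc.2.length
  let ok_rows := PySem.Str.join "" acc.1
  let fail_rows := PySem.Str.join "" acc.2
  let html := pvHeader
  let html := if ok_count > 0 then html ++ pvOkBlock ok_count ok_rows else html
  let html := if fail_count > 0 then html ++ pvFailBlock fail_count fail_rows else html
  html ++ pvFooter

-- ===== PRECONDITION & SPEC =====
def Spec_build_product_detail_section_py (products : List (List (String × String))) (out : String) : Prop := out = build_product_detail_section_py_alt products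
instance (products : List (List (String × String))) (out : String) : Decidable (Spec_build_product_detail_section_py products out) := by unfold Spec_build_product_detail_section_py; infer_instance

-- ===== CLAIM (what is proved, stated in full; the proofs are below) =====
def Claim_equal_build_product_detail_section_py : Prop := ∀ (products : List (List (String × String))), Dom_build_product_detail_section_py products → Spec_build_product_detail_section_py products (build_product_detail_section_py products)

-- ===== LEMMAS AND PROOFS =====

def pvOkOf (products : List (List (String × String))) : List String :=
  products.filterMap (fun p => if pvGet p "status" = some "ok" then some (pvRowOkB p) else none)
def pvFailOf (products : List (List (String × String))) : List String :=
  products.filterMap (fun p => if pvGet p "status" = some "failed" then some (pvRowFailB p) else none)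

theorem pvJoin_cons (a : String) (l : List String) :
    PySem.Str.join "" (a :: l) = a ++ PySem.Str.join "" l := by
  cases l with
  | nil => simp [PySem.Str.join, PySem.Chars.join, List.intercalate]
  | cons b t =>
    simp [PySem.Str.join, PySem.Chars.join, List.intercalate, String.ofList_append]

theorem pvJoin_nil : PySem.Str.join "" ([] : List String) = "" := by
  simp [PySem.Str.join, PySem.Chars.join, List.intercalate]

theorem pvPartB_spec (products : List (List (String × String))) (a b : List String) :
    products.foldl (fun acc p =>
      if pvGet p "status" = some "ok" then (acc.1 ++ [pvRowOkB p], acc.2)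
      else if pvGet p "status" = some "failed" then (acc.1, acc.2 ++ [pvRowFailB p])
      else acc) (a, b) = (a ++ pvOkOf products, b ++ pvFailOf products) := by
  induction products generalizing a b with
  | nil => simp [pvOkOf, pvFailOf]
  | cons p ps ih =>
    rw [List.foldl_cons]
    by_cases h1 : pvGet p "status" = some "ok"
    · simp only [h1, if_true]
      rw [ih]
      simp [pvOkOf, pvFailOf, h1]
    · by_cases h2 : pvGet p "status" = some "failed"
      · simp only [h2, if_true]
        rw [ih]
        simp [pvOkOf, pvFailOf, h2]
      · simp only [if_neg h1, if_neg h2]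
        rw [ih]
        simp [pvOkOf, pvFailOf, h1, h2]

theorem pvRowsA_ok (products : List (List (String × String))) (acc : String) :
    products.foldl (fun rows p =>
      if pvGet p "status" ≠ some "ok" then rows
      else
        let code := (pvGet p "product_code").getD "—"
        let name := match pvGet p "product_name" with
          | some s => if s = "" then "—" else s
          | none => "—"
        let icon := if ("ok" : String) = "ok" then "&#10003;" else "&#10007;"
        let color := if ("ok" : String) = "ok" then "#2e7d32" else "#c62828"
        let rows := rows ++ ("<tr>" ++ pvTd ++ code ++ "</td>" ++ pvTd ++ name ++ "</td>" ++ pvTdIcon color ++ icon ++ "</td>")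
        let rows := if ("ok" : String) ≠ "ok" then
            rows ++ (pvTdReason ++ (pvGet p "error_message").getD "" ++ "</td>")
          else rows
        rows ++ "</tr>\n") acc = acc ++ PySem.Str.join "" (pvOkOf products) := by
  induction products generalizing acc with
  | nil => simp [pvOkOf, pvJoin_nil]
  | cons p ps ih =>
    rw [List.foldl_cons, ih]
    by_cases h1 : pvGet p "status" = some "ok"
    · simp [pvOkOf, h1, pvJoin_cons, pvRowOkB, String.append_assoc]
    · simp [pvOkOf, h1]

theorem pvRowsA_fail (products : List (List (String × String))) (acc : String) :
    products.foldl (fun rows p =>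
      if pvGet p "status" ≠ some "failed" then rows
      else
        let code := (pvGet p "product_code").getD "—"
        let name := match pvGet p "product_name" with
          | some s => if s = "" then "—" else s
          | none => "—"
        let icon := if ("failed" : String) = "ok" then "&#10003;" else "&#10007;"
        let color := if ("failed" : String) = "ok" then "#2e7d32" else "#c62828"
        let rows := rows ++ ("<tr>" ++ pvTd ++ code ++ "</td>" ++ pvTd ++ name ++ "</td>" ++ pvTdIcon color ++ icon ++ "</td>")
        let rows := if ("failed" : String) ≠ "ok" then
            rows ++ (pvTdReason ++ (pvGet p "error_message").getD "" ++ "</td>")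
          else rows
        rows ++ "</tr>\n") acc = acc ++ PySem.Str.join "" (pvFailOf products) := by
  induction products generalizing acc with
  | nil => simp [pvFailOf, pvJoin_nil]
  | cons p ps ih =>
    rw [List.foldl_cons, ih]
    by_cases h1 : pvGet p "status" = some "failed"
    · simp [pvFailOf, h1, pvJoin_cons, pvRowFailB, String.append_assoc]
    · simp [pvFailOf, h1]

theorem pvCountA_ok (products : List (List (String × String))) (n : Int) :
    products.foldl (fun n p => if pvGet p "status" = some "ok" then n + 1 else n) n
      = n + (pvOkOf products).length := by
  induction products generalizing n with
  | nil => simp [pvOkOf]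
  | cons p ps ih =>
    by_cases h1 : pvGet p "status" = some "ok" <;>
      · rw [List.foldl_cons]
        simp [pvOkOf, h1, ih]
        try omega

theorem pvCountA_fail (products : List (List (String × String))) (n : Int) :
    products.foldl (fun n p => if pvGet p "status" = some "failed" then n + 1 else n) n
      = n + (pvFailOf products).length := by
  induction products generalizing n with
  | nil => simp [pvFailOf]
  | cons p ps ih =>
    by_cases h1 : pvGet p "status" = some "failed" <;>
      · rw [List.foldl_cons]
        simp [pvFailOf, h1, ih]
        try omega

-- ===== VERDICT (by name: the statement is the Claim_ definition above) =====
theorem build_product_detail_section_py_spec : Claim_equal_build_product_detail_section_py := by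
  intro products _
  unfold Spec_build_product_detail_section_py
  unfold build_product_detail_section_py build_product_detail_section_py_alt
  unfold pvRowsA pvCountA pvPartB
  rw [pvPartB_spec products [] []]
  rw [pvRowsA_ok products "", pvRowsA_fail products "", pvCountA_ok products 0, pvCountA_fail products 0]
  simp
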